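-- pv_equiv track=rewrite | github.com/ImAGhost00/oogworld | main.py | _trim_section_bullets
-- ===== SOURCE A (Python) =====
-- def _trim_section_bullets(content: str, section_header: str, max_bullets: int) -> str:
--     lines = content.splitlines()
--     section_start = -1
--     for idx, raw in enumerate(lines):
--         if raw.strip() == section_header:
--             section_start = idx
--             break
--     if section_start == -1:
--         return content
--
--     section_end = len(lines)
--     for idx in range(section_start + 1, len(lines)):
--         if lines[idx].strip().startswith("## "):
--             section_end = idx
--             break
--
--     bullet_idxs = [
--         idx
--         for idx in range(section_start + 1, section_end)
--         if lines[idx].strip().startswith("- ")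
--     ]
--     overflow = len(bullet_idxs) - max(1, max_bullets)
--     if overflow <= 0:
--         return content
--
--     drop_set = set(bullet_idxs[:overflow])
--     new_lines = [line for idx, line in enumerate(lines) if idx not in drop_set]
--     compacted = "\n".join(new_lines)
--     if content.endswith("\n"):
--         compacted += "\n"
--     return compacted
-- ===== SOURCE B (Python) =====
-- def _trim_section_bullets(content: str, section_header: str, max_bullets: int) -> str:
--     lines = content.splitlines()
--     section_start = -1
--     for idx, raw in enumerate(lines):
--         if raw.strip() == section_header:
--             section_start = idx
--             break
--     if section_start == -1:
--         return content
--
--     section_end = len(lines)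
--     for idx in range(section_start + 1, len(lines)):
--         if lines[idx].strip().startswith("## "):
--             section_end = idx
--             break
--
--     # Reverse pass: keep only the LAST k bullet lines of the section, never
--     # needing the total bullet count; build the surviving lines back-to-front.
--     keep_quota = max(1, max_bullets)
--     seen = 0
--     kept = []
--     for idx in range(len(lines) - 1, -1, -1):
--         line = lines[idx]
--         if section_start < idx < section_end and line.strip().startswith("- "):
--             seen += 1
--             if seen > keep_quota:
--                 continue
--         kept.append(line)
--     if len(kept) == len(lines):
--         return content
--     kept.reverse()
--     compacted = "\n".join(kept)
--     if content.endswith("\n"):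
--         compacted += "\n"
--     return compacted
-- ===== Notes on version B (the rewrite author's own statement) =====
-- stated objective: alternative
-- what changed: Instead of collecting all bullet indices, slicing off the first overflow = total - max(1,max_bullets) of them into a drop set and re-filtering by index membership, B never computes the total bullet count: it scans the lines in reverse with a counter of section bullets seen from the end, keeps the last max(1,max_bullets) bullet lines, drops earlier ones, and builds the surviving lines back-to-front.
import Mathlib
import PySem

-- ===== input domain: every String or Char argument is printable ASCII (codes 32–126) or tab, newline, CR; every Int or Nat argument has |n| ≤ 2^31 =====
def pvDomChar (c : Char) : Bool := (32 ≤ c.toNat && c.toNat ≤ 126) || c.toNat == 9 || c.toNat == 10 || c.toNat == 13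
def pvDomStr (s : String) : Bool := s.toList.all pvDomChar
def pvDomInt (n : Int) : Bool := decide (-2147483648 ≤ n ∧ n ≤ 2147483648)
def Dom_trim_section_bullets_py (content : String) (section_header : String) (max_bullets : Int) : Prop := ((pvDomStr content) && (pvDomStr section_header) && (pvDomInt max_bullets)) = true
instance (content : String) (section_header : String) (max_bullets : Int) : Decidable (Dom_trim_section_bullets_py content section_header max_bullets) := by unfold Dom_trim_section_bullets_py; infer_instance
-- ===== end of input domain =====

-- B trims the section with a single reverse scan keeping the last max(1,max_bullets)
-- bullet lines (no total bullet count, no drop set); same return value as A (alternative decomposition).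

-- ===== PORT A =====
-- first loop of A: first index whose stripped line equals the header, else -1
def aFindStart (section_header : String) : List String → Int → Int
  | [], _ => -1
  | raw :: rest, idx =>
      if PySem.Str.strip raw == section_header then idx
      else aFindStart section_header rest (idx + 1)

-- second loop of A: first index in idxs whose line starts a new '## ' section, else dflt
def aFindEnd (lines : List String) : List Int → Int → Int
  | [], dflt => dflt
  | idx :: rest, dflt =>
      if PySem.Str.startswith (PySem.Str.strip (PySem.List.pyGetD lines idx "")) "## " then idx
      else aFindEnd lines rest dflt

def trim_section_bullets_py (content : String) (section_header : String) (max_bullets : Int) : String :=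
  let lines := PySem.Str.splitlines content
  let section_start := aFindStart section_header lines 0
  if section_start == -1 then content
  else
    let section_end := aFindEnd lines (PySem.List.pyRange (section_start + 1) (lines.length : Int)) (lines.length : Int)
    let bullet_idxs := (PySem.List.pyRange (section_start + 1) section_end).filter
      (fun idx => PySem.Str.startswith (PySem.Str.strip (PySem.List.pyGetD lines idx "")) "- ")
    let overflow : Int := (bullet_idxs.length : Int) - max 1 max_bullets
    if overflow ≤ 0 then content
    else
      let drop_set : PySem.Set Int := PySem.Set.ofList (PySem.List.slice bullet_idxs none (some overflow))
      let new_lines := ((PySem.List.enumerate lines).filter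
        (fun p => !(PySem.Set.contains drop_set p.1))).map (fun p => p.2)
      let compacted := PySem.Str.join "\n" new_lines
      if PySem.Str.endswith content "\n" then compacted ++ "\n" else compacted

-- ===== PORT B =====
-- B's reverse loop ('for idx in range(len(lines)-1, -1, -1)' with append + final reverse):
-- processed here back-to-front as structural recursion; returns (bullets seen from the end, surviving lines)
def bGo (section_start section_end keep_quota : Int) : Int → List String → Int × List String
  | _, [] => (0, [])
  | idx, line :: rest =>
      let r := bGo section_start section_end keep_quota (idx + 1) rest
      if section_start < idx ∧ idx < section_end ∧ PySem.Str.startswith (PySem.Str.strip line) "- " then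
        if r.1 + 1 > keep_quota then (r.1 + 1, r.2) else (r.1 + 1, line :: r.2)
      else (r.1, line :: r.2)

def trim_section_bullets_py_alt (content : String) (section_header : String) (max_bullets : Int) : String :=
  let lines := PySem.Str.splitlines content
  match (PySem.List.enumerate lines).find? (fun p => PySem.Str.strip p.2 == section_header) with
  | none => content
  | some p =>
    let section_start := p.1
    let section_end := ((PySem.List.pyRange (section_start + 1) (lines.length : Int)).find?
        (fun idx => PySem.Str.startswith (PySem.Str.strip (PySem.List.pyGetD lines idx "")) "## ")).getD (lines.length : Int)
    let keep_quota : Int := max 1 max_bullets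
    let kept := (bGo section_start section_end keep_quota 0 lines).2
    if kept.length == lines.length then content
    else
      let compacted := PySem.Str.join "\n" kept
      if PySem.Str.endswith content "\n" then compacted ++ "\n" else compacted

-- ===== PRECONDITION & SPEC =====
def Spec_trim_section_bullets_py (content : String) (section_header : String) (max_bullets : Int) (out : String) : Prop := out = trim_section_bullets_py_alt content section_header max_bullets
instance (content : String) (section_header : String) (max_bullets : Int) (out : String) : Decidable (Spec_trim_section_bullets_py content section_header max_bullets out) := by unfold Spec_trim_section_bullets_py; infer_instance

-- ===== CLAIM (what is proved, stated in full; the proofs are below) =====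
def Claim_equal_trim_section_bullets_py : Prop := ∀ (content : String) (section_header : String) (max_bullets : Int), Dom_trim_section_bullets_py content section_header max_bullets → Spec_trim_section_bullets_py content section_header max_bullets (trim_section_bullets_py content section_header max_bullets)

-- ===== LEMMAS AND PROOFS =====

-- the per-line bullet test, as a Bool predicate on an enumerated pair
def pvB (s e : Int) (p : Int × String) : Bool :=
  decide (s < p.1) && decide (p.1 < e) && PySem.Str.startswith (PySem.Str.strip p.2) "- "

-- reference form of B's reverse scan on an enumerated list
def pvKeep (Bl : Int × String → Bool) (k : Int) : List (Int × String) → List String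
  | [] => []
  | p :: rest =>
      if Bl p ∧ ((rest.countP Bl : Int) + 1 > k) then pvKeep Bl k rest
      else p.2 :: pvKeep Bl k rest

lemma pv_findStart_eq (hdr : String) : ∀ (ls : List String) (i : Int),
    aFindStart hdr ls i
      = (((PySem.List.enumerate ls i).find? (fun p => PySem.Str.strip p.2 == hdr)).map (·.1)).getD (-1) := by
  intro ls
  induction ls with
  | nil => intro i; simp [aFindStart, PySem.List.enumerate_nil]
  | cons x xs ih =>
      intro i
      rw [PySem.List.enumerate_cons, List.find?_cons]
      by_cases h : PySem.Str.strip x == hdr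
      · simp [aFindStart, h]
      · simp only [aFindStart, h]
        simp only [Bool.not_eq_true] at h
        simp [ih (i + 1)]

lemma pv_findEnd_eq (lines : List String) : ∀ (idxs : List Int) (dflt : Int),
    aFindEnd lines idxs dflt
      = ((idxs.find? (fun idx => PySem.Str.startswith (PySem.Str.strip (PySem.List.pyGetD lines idx "")) "## ")).getD dflt) := by
  intro idxs
  induction idxs with
  | nil => intro dflt; simp [aFindEnd]
  | cons j rest ih =>
      intro dflt
      rw [aFindEnd, List.find?_cons]
      by_cases h : PySem.Str.startswith (PySem.Str.strip (PySem.List.pyGetD lines j "")) "## " = true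
      · rw [if_pos h, h]
        rfl
      · rw [if_neg h]
        simp only [Bool.not_eq_true] at h
        rw [h]
        exact ih dflt

-- B's loop computes (count of section bullets, pvKeep) on the enumerated suffix
lemma pv_bGo_eq (s e k : Int) : ∀ (ls : List String) (i : Int),
    bGo s e k i ls
      = (((PySem.List.enumerate ls i).countP (pvB s e) : Int), pvKeep (pvB s e) k (PySem.List.enumerate ls i)) := by
  intro ls
  induction ls with
  | nil => intro i; simp [bGo, PySem.List.enumerate_nil, pvKeep]
  | cons x xs ih =>
      intro i
      rw [PySem.List.enumerate_cons]
      rw [bGo]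
      rw [ih (i + 1)]
      by_cases h : s < i ∧ i < e ∧ PySem.Str.startswith (PySem.Str.strip x) "- " = true
      · have hB : pvB s e (i, x) = true := by
          simp only [pvB, h.2.2, decide_eq_true h.1, decide_eq_true h.2.1, Bool.and_self]
        have hcnt : (List.countP (pvB s e) ((i, x) :: PySem.List.enumerate xs (i + 1)) : Int)
            = (List.countP (pvB s e) (PySem.List.enumerate xs (i + 1)) : Int) + 1 := by
          rw [List.countP_cons, hB]; simp
        rw [if_pos h, pvKeep, hcnt]
        by_cases hk : ((List.countP (pvB s e) (PySem.List.enumerate xs (i + 1)) : Int)) + 1 > k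
        · rw [if_pos hk, if_pos ⟨hB, hk⟩]
        · rw [if_neg hk, if_neg (by intro h'; exact hk h'.2)]
      · have hB : pvB s e (i, x) = false := by
          simp only [pvB, Bool.and_eq_false_iff]
          by_cases h1 : s < i
          · by_cases h2 : i < e
            · right
              have hb : ¬ PySem.Str.startswith (PySem.Str.strip x) "- " = true :=
                fun hb => h ⟨h1, h2, hb⟩
              simpa using hb
            · left; right; simpa using h2
          · left; left; simpa using h1
        have hcnt : (List.countP (pvB s e) ((i, x) :: PySem.List.enumerate xs (i + 1)) : Int)
            = (List.countP (pvB s e) (PySem.List.enumerate xs (i + 1)) : Int) := by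
          rw [List.countP_cons, hB]; simp
        rw [if_neg h, pvKeep, hcnt]
        rw [if_neg (by intro h'; rw [hB] at h'; exact Bool.false_ne_true h'.1)]

-- the crux: dropping the first (count - k) elements of the Bl-filter by index membership
-- is the same as keeping, per element, only when at most k-1 Bl-elements follow
lemma pv_core (Bl : Int × String → Bool) (k : Int) :
    ∀ (l : List (Int × String)), l.Pairwise (fun p q => p.1 < q.1) →
    ∀ (D : List Int), D = List.take ((l.countP Bl : Int) - k).toNat ((l.filter Bl).map (·.1)) →
    (l.filter (fun p => !(D.contains p.1))).map (·.2) = pvKeep Bl k l := by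
  intro l
  induction l with
  | nil =>
      intro _ D hD
      simp at hD
      simp [hD, pvKeep]
  | cons p rest ih =>
      intro hpw D hD
      have h1 : ∀ q ∈ rest, p.1 < q.1 := (List.pairwise_cons.mp hpw).1
      have h2 := (List.pairwise_cons.mp hpw).2
      by_cases hb : Bl p = true
      · have hcnt : (p :: rest).countP Bl = rest.countP Bl + 1 := by
          simp [hb]
        have hflt : (p :: rest).filter Bl = p :: rest.filter Bl := by
          simp [hb]
        by_cases hk : k ≤ (rest.countP Bl : Int)
        · -- p is dropped on both sides
          have htn : (((p :: rest).countP Bl : Int) - k).toNat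
              = (((rest.countP Bl : Int) - k)).toNat + 1 := by
            rw [hcnt]; omega
          have hDc : D = p.1 :: List.take (((rest.countP Bl : Int) - k)).toNat ((rest.filter Bl).map (·.1)) := by
            rw [hD, hflt, htn]
            simp
          have hpin : D.contains p.1 = true := by
            rw [hDc]; simp
          have hrest : ∀ q ∈ rest,
              (D.contains q.1) = ((List.take (((rest.countP Bl : Int) - k)).toNat ((rest.filter Bl).map (·.1))).contains q.1) := by
            intro q hq
            rw [hDc]
            have : ¬ (q.1 = p.1) := by have := h1 q hq; omega
            simp [this]
          rw [List.filter_cons]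
          simp only [hpin, Bool.not_true]
          rw [if_neg (by simp)]
          have hfc : rest.filter (fun q => !(D.contains q.1))
              = rest.filter (fun q => !((List.take (((rest.countP Bl : Int) - k)).toNat ((rest.filter Bl).map (·.1))).contains q.1)) := by
            apply List.filter_congr
            intro q hq
            rw [hrest q hq]
          rw [hfc, ih h2 _ rfl]
          have : pvKeep Bl k (p :: rest) = pvKeep Bl k rest := by
            rw [pvKeep]
            rw [if_pos ⟨hb, by omega⟩]
          rw [this]
        · -- quota not exceeded: D = [] and p is kept
          have hD0 : D = [] := by
            rw [hD]
            have : (((p :: rest).countP Bl : Int) - k).toNat = 0 := by rw [hcnt]; omega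
            simp [this]
          have hD0' : ([] : List Int) = List.take (((rest.countP Bl : Int) - k)).toNat ((rest.filter Bl).map (·.1)) := by
            have : (((rest.countP Bl : Int) - k)).toNat = 0 := by omega
            simp [this]
          have hkeep : pvKeep Bl k (p :: rest) = p.2 :: pvKeep Bl k rest := by
            rw [pvKeep]
            rw [if_neg (by intro h'; exact absurd h'.2 (by omega))]
          rw [hD0, hkeep, ← ih h2 [] hD0']
          simp
      · -- not a bullet line: kept on both sides, D unchanged
        have hb' : Bl p = false := by simpa using hb
        have hcnt : (p :: rest).countP Bl = rest.countP Bl := by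
          simp [hb']
        have hflt : (p :: rest).filter Bl = rest.filter Bl := by
          simp [hb']
        have hDr : D = List.take (((rest.countP Bl : Int) - k)).toNat ((rest.filter Bl).map (·.1)) := by
          rw [hD, hcnt, hflt]
        have hpD : D.contains p.1 = false := by
          rw [List.contains_eq_any_beq]
          rw [List.any_eq_false]
          intro x hx
          have hx' : x ∈ ((rest.filter Bl).map (·.1)) := by
            rw [hDr] at hx
            exact List.mem_of_mem_take hx
          obtain ⟨q, hq, hqx⟩ := List.mem_map.mp hx'
          have hq' : q ∈ rest := List.mem_of_mem_filter hq
          have := h1 q hq'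
          simp only [beq_iff_eq]
          omega
        rw [List.filter_cons]
        simp only [hpD, Bool.not_false, if_pos]
        rw [List.map_cons, ih h2 D hDr]
        have : pvKeep Bl k (p :: rest) = p.2 :: pvKeep Bl k rest := by
          rw [pvKeep]
          rw [if_neg (by intro h'; exact absurd h'.1 (by simp [hb']))]
        rw [this]

-- A's bullet-index list is the first projection of the pvB-filter of the enumerated lines
lemma pv_bidxs_eq (lines : List String) (s e : Int) (hs : 0 ≤ s) (hse : s + 1 ≤ e)
    (hen : e ≤ (lines.length : Int)) :
    (PySem.List.pyRange (s + 1) e).filter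
        (fun idx => PySem.Str.startswith (PySem.Str.strip (PySem.List.pyGetD lines idx "")) "- ")
      = ((PySem.List.enumerate lines).filter (pvB s e)).map (·.1) := by
  rw [PySem.List.enumerate_eq_map_pyRange lines ""]
  rw [List.filter_map, List.map_map]
  have hlen : PySem.List.len lines = (lines.length : Int) := by
    simp [PySem.List.len_eq]
  rw [hlen]
  have hsplit : PySem.List.pyRange 0 (lines.length : Int)
      = PySem.List.pyRange 0 (s + 1) ++ PySem.List.pyRange (s + 1) e ++ PySem.List.pyRange e (lines.length : Int) := by
    rw [← PySem.List.pyRange_one_append 0 (s+1) e (by omega) hse]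
    rw [← PySem.List.pyRange_one_append 0 e (lines.length : Int) (by omega) hen]
  rw [hsplit, List.filter_append, List.filter_append]
  have hleft : (PySem.List.pyRange 0 (s + 1)).filter ((pvB s e) ∘ (fun j => (j, PySem.List.pyGetD lines j ""))) = [] := by
    rw [List.filter_eq_nil_iff]
    intro j hj
    have := PySem.List.mem_pyRange_one.mp hj
    simp [pvB]
    intro h'
    omega
  have hright : (PySem.List.pyRange e (lines.length : Int)).filter ((pvB s e) ∘ (fun j => (j, PySem.List.pyGetD lines j ""))) = [] := by
    rw [List.filter_eq_nil_iff]
    intro j hj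
    have := PySem.List.mem_pyRange_one.mp hj
    simp [pvB]
    intro _ h'
    omega
  rw [hleft, hright]
  simp only [List.append_nil, List.nil_append]
  have hmid : (PySem.List.pyRange (s + 1) e).filter ((pvB s e) ∘ (fun j => (j, PySem.List.pyGetD lines j "")))
      = (PySem.List.pyRange (s + 1) e).filter (fun idx => PySem.Str.startswith (PySem.Str.strip (PySem.List.pyGetD lines idx "")) "- ") := by
    apply List.filter_congr
    intro j hj
    have := PySem.List.mem_pyRange_one.mp hj
    simp [pvB]
    intro _
    constructor <;> omega
  rw [hmid]
  have hcomp : (((fun (x : Int × String) => x.1)) ∘ (fun j => (j, PySem.List.pyGetD lines j ""))) = (fun j : Int => j) := rfl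
  rw [hcomp, List.map_id']

-- Set.ofList does not change list membership, hence not the contains test
lemma pv_contains_ofList (D : List Int) (x : Int) :
    PySem.Set.contains (PySem.Set.ofList D) x = D.contains x := by
  rw [Bool.eq_iff_iff]
  simp [PySem.Set.contains]

-- the body of both ports, once the section has been located, agree
lemma pv_body_eq (lines : List String) (s e k : Int) (hs : 0 ≤ s) (hse : s + 1 ≤ e)
    (hen : e ≤ (lines.length : Int)) (hk1 : 1 ≤ k) (content : String) :
    (if ((((PySem.List.pyRange (s + 1) e).filter
          (fun idx => PySem.Str.startswith (PySem.Str.strip (PySem.List.pyGetD lines idx "")) "- ")).length : Int) - k ≤ 0) then content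
     else
      (if PySem.Str.endswith content "\n" then
        PySem.Str.join "\n" (((PySem.List.enumerate lines).filter
          (fun p => !(PySem.Set.contains (PySem.Set.ofList (PySem.List.slice ((PySem.List.pyRange (s + 1) e).filter
            (fun idx => PySem.Str.startswith (PySem.Str.strip (PySem.List.pyGetD lines idx "")) "- ")) none
            (some ((((PySem.List.pyRange (s + 1) e).filter
              (fun idx => PySem.Str.startswith (PySem.Str.strip (PySem.List.pyGetD lines idx "")) "- ")).length : Int) - k)))) p.1))).map (fun p => p.2)) ++ "\n"
       else
        PySem.Str.join "\n" (((PySem.List.enumerate lines).filter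
          (fun p => !(PySem.Set.contains (PySem.Set.ofList (PySem.List.slice ((PySem.List.pyRange (s + 1) e).filter
            (fun idx => PySem.Str.startswith (PySem.Str.strip (PySem.List.pyGetD lines idx "")) "- ")) none
            (some ((((PySem.List.pyRange (s + 1) e).filter
              (fun idx => PySem.Str.startswith (PySem.Str.strip (PySem.List.pyGetD lines idx "")) "- ")).length : Int) - k)))) p.1))).map (fun p => p.2))))
    = (if (bGo s e k 0 lines).2.length == lines.length then content
       else
        (if PySem.Str.endswith content "\n" then PySem.Str.join "\n" (bGo s e k 0 lines).2 ++ "\n"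
         else PySem.Str.join "\n" (bGo s e k 0 lines).2)) := by
  have hpw := PySem.List.pairwise_lt_enumerate lines 0
  have hbx := pv_bidxs_eq lines s e hs hse hen
  have hcl : ((PySem.List.pyRange (s + 1) e).filter
      (fun idx => PySem.Str.startswith (PySem.Str.strip (PySem.List.pyGetD lines idx "")) "- ")).length
      = (PySem.List.enumerate lines).countP (pvB s e) := by
    rw [hbx, List.length_map, List.countP_eq_length_filter]
  have hkept : (bGo s e k 0 lines).2 = pvKeep (pvB s e) k (PySem.List.enumerate lines) := by
    rw [pv_bGo_eq s e k lines 0]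
  by_cases hov : (((PySem.List.pyRange (s + 1) e).filter
      (fun idx => PySem.Str.startswith (PySem.Str.strip (PySem.List.pyGetD lines idx "")) "- ")).length : Int) - k ≤ 0
  · -- no overflow: both sides return content
    have hD0 : ([] : List Int) = List.take ((((PySem.List.enumerate lines).countP (pvB s e) : Int) - k)).toNat
        (((PySem.List.enumerate lines).filter (pvB s e)).map (·.1)) := by
      have : ((((PySem.List.enumerate lines).countP (pvB s e) : Int) - k)).toNat = 0 := by
        rw [hcl] at hov; omega
      simp [this]
    have hall : pvKeep (pvB s e) k (PySem.List.enumerate lines) = lines := by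
      rw [← pv_core (pvB s e) k (PySem.List.enumerate lines) hpw [] hD0]
      have : ((PySem.List.enumerate lines).filter (fun p => !(([] : List Int).contains p.1)))
          = PySem.List.enumerate lines := by
        apply List.filter_eq_self.mpr
        intro q _
        simp
      rw [this, PySem.List.map_snd_enumerate]
    rw [if_pos hov, hkept, hall]
    simp
  · -- overflow: both sides rebuild from the same surviving lines
    rw [if_neg hov]
    rw [PySem.List.slice_to _ (by omega)]
    have hDdef : List.take (((((PySem.List.pyRange (s + 1) e).filter
          (fun idx => PySem.Str.startswith (PySem.Str.strip (PySem.List.pyGetD lines idx "")) "- ")).length : Int) - k)).toNat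
          ((PySem.List.pyRange (s + 1) e).filter
            (fun idx => PySem.Str.startswith (PySem.Str.strip (PySem.List.pyGetD lines idx "")) "- "))
        = List.take ((((PySem.List.enumerate lines).countP (pvB s e) : Int) - k)).toNat
          (((PySem.List.enumerate lines).filter (pvB s e)).map (·.1)) := by
      rw [hbx, List.length_map, List.countP_eq_length_filter]
    have hnew : ((PySem.List.enumerate lines).filter
        (fun p => !(PySem.Set.contains (PySem.Set.ofList (List.take (((((PySem.List.pyRange (s + 1) e).filter
          (fun idx => PySem.Str.startswith (PySem.Str.strip (PySem.List.pyGetD lines idx "")) "- ")).length : Int) - k)).toNat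
          ((PySem.List.pyRange (s + 1) e).filter
            (fun idx => PySem.Str.startswith (PySem.Str.strip (PySem.List.pyGetD lines idx "")) "- ")))) p.1))).map (fun p => p.2)
        = pvKeep (pvB s e) k (PySem.List.enumerate lines) := by
      rw [← pv_core (pvB s e) k (PySem.List.enumerate lines) hpw _ hDdef]
      congr 1
      apply List.filter_congr
      intro q _
      rw [pv_contains_ofList]
    -- the first bullet line is dropped, so B does not take the unchanged branch
    have htn : 1 ≤ ((((PySem.List.enumerate lines).countP (pvB s e) : Int) - k)).toNat := by
      rw [hcl] at hov; omega
    obtain ⟨q, rest, hqr⟩ : ∃ q rest, (PySem.List.enumerate lines).filter (pvB s e) = q :: rest := by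
      apply List.exists_cons_of_ne_nil
      intro hnil
      rw [List.countP_eq_length_filter, hnil] at htn
      simp at htn
      omega
    have hq1 : q.1 ∈ List.take ((((PySem.List.enumerate lines).countP (pvB s e) : Int) - k)).toNat
        (((PySem.List.enumerate lines).filter (pvB s e)).map (·.1)) := by
      rcases Nat.exists_eq_add_of_le htn with ⟨m, hm⟩
      rw [hqr, hm, List.map_cons]
      have : 1 + m = m + 1 := by omega
      rw [this, List.take_succ_cons]
      exact List.mem_cons_self
    have hlt : (pvKeep (pvB s e) k (PySem.List.enumerate lines)).length < lines.length := by
      rw [← hnew, List.length_map]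
      have hlen0 : (PySem.List.enumerate lines).length = lines.length := by
        simp [PySem.List.length_enumerate]
      rw [← hlen0]
      apply List.length_filter_lt_length_iff_exists.mpr
      refine ⟨q, List.mem_of_mem_filter (by rw [hqr]; exact List.mem_cons_self), ?_⟩
      simp only [PySem.Set.contains_eq_listContains, List.contains_eq_mem, PySem.Set.mem_ofList,
        Bool.not_eq_eq_eq_not, hDdef]
      simpa using hq1
    have hne : ((bGo s e k 0 lines).2.length == lines.length) = false := by
      rw [hkept]
      simp only [beq_eq_false_iff_ne, ne_eq]
      omega
    rw [hne, hnew, hkept]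
    simp

-- ===== VERDICT (by name: the statement is the Claim_ definition above) =====
theorem trim_section_bullets_py_spec : Claim_equal_trim_section_bullets_py := by
  intro content section_header max_bullets _
  unfold Spec_trim_section_bullets_py
  simp only [trim_section_bullets_py, trim_section_bullets_py_alt]
  rw [pv_findStart_eq section_header (PySem.Str.splitlines content) 0]
  cases hf : (PySem.List.enumerate (PySem.Str.splitlines content)).find?
      (fun p => PySem.Str.strip p.2 == section_header) with
  | none =>
      simp
  | some p =>
      have hmem := List.mem_of_find?_eq_some hf
      obtain ⟨kk, hkk, hp⟩ := (PySem.List.mem_enumerate_iff _ _ _).mp hmem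
      have hs : 0 ≤ p.1 ∧ p.1 < ((PySem.Str.splitlines content).length : Int) := by
        rw [hp]
        refine ⟨by simp, by simp; omega⟩
      rw [Option.map_some, Option.getD_some]
      rw [if_neg (by simp; omega)]
      rw [pv_findEnd_eq]
      have hse : p.1 + 1 ≤ (((PySem.List.pyRange (p.1 + 1) ((PySem.Str.splitlines content).length : Int)).find?
            (fun idx => PySem.Str.startswith (PySem.Str.strip (PySem.List.pyGetD (PySem.Str.splitlines content) idx "")) "## ")).getD
            ((PySem.Str.splitlines content).length : Int))
          ∧ (((PySem.List.pyRange (p.1 + 1) ((PySem.Str.splitlines content).length : Int)).find?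
            (fun idx => PySem.Str.startswith (PySem.Str.strip (PySem.List.pyGetD (PySem.Str.splitlines content) idx "")) "## ")).getD
            ((PySem.Str.splitlines content).length : Int)) ≤ ((PySem.Str.splitlines content).length : Int) := by
        cases hfe : (PySem.List.pyRange (p.1 + 1) ((PySem.Str.splitlines content).length : Int)).find?
            (fun idx => PySem.Str.startswith (PySem.Str.strip (PySem.List.pyGetD (PySem.Str.splitlines content) idx "")) "## ") with
        | none => simp [Option.getD_none]; omega
        | some j =>
            have := PySem.List.mem_pyRange_one.mp (List.mem_of_find?_eq_some hfe)
            simp [Option.getD_some]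
            omega
      exact pv_body_eq (PySem.Str.splitlines content) p.1 _ (max 1 max_bullets)
        hs.1 hse.1 hse.2 (le_max_left 1 max_bullets) content
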